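-- pv_equiv track=rewrite | github.com/leonardif-edts/airflow-manager | scripts/utils.py | filter_out_keys
-- ===== SOURCE A (Python) =====
-- def filter_out_keys(data: list, keys: list) -> list:
--     fltr_columns = [
--         {
--             key: value
--             for key, value in column.items()
--             if (key not in keys)
--         }
--         for column in data
--     ]
--     return fltr_columns
-- ===== SOURCE B (Python) =====
-- def filter_out_keys(data: list, keys: list) -> list:
--     result = []
--     for column in data:
--         copy = dict(column)
--         for key in keys:
--             copy.pop(key, None)
--         result.append(copy)
--     return result
-- ===== Notes on version B (the rewrite author's own statement) =====
-- stated objective: faster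
-- what changed: Instead of rebuilding each dict by a comprehension that scans the keys list for every item, B shallow-copies each dict and pops the listed keys from the copy, looping over the keys to remove rather than over the items.
import Mathlib
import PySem

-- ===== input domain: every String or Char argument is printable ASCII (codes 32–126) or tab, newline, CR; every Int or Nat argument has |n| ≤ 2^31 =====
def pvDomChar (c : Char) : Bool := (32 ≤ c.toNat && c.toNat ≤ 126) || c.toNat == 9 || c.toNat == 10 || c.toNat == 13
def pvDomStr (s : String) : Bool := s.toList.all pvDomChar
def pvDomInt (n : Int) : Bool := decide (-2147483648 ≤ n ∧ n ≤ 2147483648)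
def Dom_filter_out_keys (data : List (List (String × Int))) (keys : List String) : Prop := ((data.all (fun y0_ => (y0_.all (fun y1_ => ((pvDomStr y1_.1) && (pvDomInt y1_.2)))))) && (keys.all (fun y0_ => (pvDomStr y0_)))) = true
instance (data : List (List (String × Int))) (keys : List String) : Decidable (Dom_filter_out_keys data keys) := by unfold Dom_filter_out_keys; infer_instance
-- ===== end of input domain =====

-- B drops the listed keys by popping them from a shallow copy of each dict (a loop over the
-- keys to remove) instead of rebuilding each dict with a membership test per item; an
-- alternative decomposition, same return value, no mutation of the inputs.

-- ===== PORT A =====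
-- the dict comprehension: build each result dict by inserting the pairs whose key is not in keys
def filter_out_keys (data : List (List (String × Int))) (keys : List String) : List (List (String × Int)) :=
  let fltr_columns := data.map (fun column =>
    (column.foldl (fun d kv => if keys.contains kv.1 then d else d.insert kv.1 kv.2)
      PySem.Dict.empty).items)
  fltr_columns

-- ===== PORT B =====
-- copy = dict(column); for key in keys: copy.pop(key, None); result.append(copy)
def filter_out_keys_alt (data : List (List (String × Int))) (keys : List String) : List (List (String × Int)) :=
  data.foldl (fun result column =>
    result ++ [(keys.foldl (fun copy key =>
        match copy.pop? key with
        | some (_, d) => d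
        | none => copy) (PySem.Dict.ofList column)).items]) []

-- ===== PRECONDITION & SPEC =====
def Spec_filter_out_keys (data : List (List (String × Int))) (keys : List String) (out : List (List (String × Int))) : Prop := out = filter_out_keys_alt data keys
instance (data : List (List (String × Int))) (keys : List String) (out : List (List (String × Int))) : Decidable (Spec_filter_out_keys data keys out) := by unfold Spec_filter_out_keys; infer_instance

-- ===== CLAIM (what is proved, stated in full; the proofs are below) =====
def Claim_equal_filter_out_keys : Prop := ∀ (data : List (List (String × Int))) (keys : List String), Dom_filter_out_keys data keys → Spec_filter_out_keys data keys (filter_out_keys data keys)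

-- ===== LEMMAS AND PROOFS =====

-- dict.pop(key, None) on the copy is exactly erase (a no-op when the key is absent)
theorem pop_step_eq_erase (d : PySem.Dict String Int) (k : String) :
    (match d.pop? k with
      | some (_, d') => d'
      | none => d) = d.erase k := by
  unfold PySem.Dict.pop?
  cases h : d.get? k with
  | some v => simp
  | none =>
    simp only [Option.map_none]
    unfold PySem.Dict.erase
    cases d with
    | mk items =>
      simp only [PySem.Dict.get?, Option.map_eq_none_iff, List.find?_eq_none] at h
      have : items.filter (fun p => !p.1 == k) = items := by
        apply List.filter_eq_self.mpr
        intro p hp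
        simpa using h p hp
      rw [this]

-- folding erase over the keys filters the items by "key not in keys"
theorem foldl_erase_eq_filter (ks : List String) (d : PySem.Dict String Int) :
    ks.foldl (fun d k => d.erase k) d
      = PySem.Dict.mk (d.items.filter (fun kv => !ks.contains kv.1)) := by
  induction ks generalizing d with
  | nil =>
    cases d; simp
  | cons k ks ih =>
    rw [List.foldl_cons, ih]
    unfold PySem.Dict.erase
    congr 1
    rw [List.filter_filter]
    apply List.filter_congr
    intro x _
    simp [Bool.not_or, Bool.and_comm, beq_eq_decide]

-- filtering by "key not in keys" commutes with the overwrite map of insert at key k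
theorem filter_map_overwrite (keys : List String) (k : String) (v : Int)
    (l : List (String × Int)) :
    List.filter (fun kv => !keys.contains kv.1)
        (l.map (fun p => if (p.1 == k) = true then (k, v) else p))
      = (List.filter (fun kv => !keys.contains kv.1) l).map
          (fun p => if (p.1 == k) = true then (k, v) else p) := by
  rw [List.filter_map]
  congr 1
  apply List.filter_congr
  intro x _
  by_cases hxk : (x.1 == k) = true
  · have hx1 : x.1 = k := eq_of_beq hxk
    simp [Function.comp, hx1]
  · simp [Function.comp, hxk]

-- inserting a pair whose key IS in keys does not change the filtered items
theorem filter_insert_mem (keys : List String) (k : String) (v : Int)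
    (d : PySem.Dict String Int) (hk : keys.contains k = true) :
    ((d.insert k v).items.filter (fun kv => !keys.contains kv.1))
      = d.items.filter (fun kv => !keys.contains kv.1) := by
  have hkmem : k ∈ keys := by simpa using hk
  unfold PySem.Dict.insert
  split
  · simp only
    rw [filter_map_overwrite]
    have hid : ∀ x ∈ d.items.filter (fun kv : String × Int => !keys.contains kv.1),
        (fun p : String × Int => if (p.1 == k) = true then (k, v) else p) x = x := by
      intro x hx
      have hpx := List.of_mem_filter hx
      by_cases hxk : (x.1 == k) = true
      · have hx1 : x.1 = k := eq_of_beq hxk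
        rw [hx1] at hpx
        simp [hkmem] at hpx
      · simp [hxk]
    rw [List.map_congr_left hid]
    simp
  · simp [List.filter_append, hkmem]

-- inserting a pair whose key is NOT in keys commutes with filtering the items
theorem insert_filter_not_mem (keys : List String) (k : String) (v : Int)
    (d : PySem.Dict String Int) (hk : keys.contains k = false) :
    (PySem.Dict.mk (d.items.filter (fun kv => !keys.contains kv.1))).insert k v
      = PySem.Dict.mk ((d.insert k v).items.filter (fun kv => !keys.contains kv.1)) := by
  have hkmem : k ∉ keys := by simpa using hk
  have hany : ∀ l : List (String × Int),
      (l.any fun a => !decide (a.1 ∈ keys) && a.1 == k) = l.any (fun p => p.1 == k) := by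
    intro l
    induction l with
    | nil => rfl
    | cons x l ih =>
      by_cases hxk : (x.1 == k) = true
      · have hx1 : x.1 = k := eq_of_beq hxk
        simp [hx1, hkmem]
      · simp [hxk, ih]
  have hcontains : (PySem.Dict.mk (d.items.filter (fun kv => !keys.contains kv.1))).contains k
      = d.contains k := by
    unfold PySem.Dict.contains
    simp only
    rw [List.any_filter]
    simpa using hany d.items
  unfold PySem.Dict.insert
  rw [hcontains]
  split
  · congr 1
    simp only
    rw [filter_map_overwrite]
  · congr 1
    simp [List.filter_append, hkmem]

-- A's insertion fold over the column equals plain insertion followed by filtering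
theorem foldl_insert_filter (keys : List String) (column : List (String × Int))
    (d : PySem.Dict String Int) :
    column.foldl (fun d kv => if keys.contains kv.1 then d else d.insert kv.1 kv.2)
        (PySem.Dict.mk (d.items.filter (fun kv => !keys.contains kv.1)))
      = PySem.Dict.mk ((column.foldl (fun d kv => d.insert kv.1 kv.2) d).items.filter
          (fun kv => !keys.contains kv.1)) := by
  induction column generalizing d with
  | nil => rfl
  | cons kv rest ih =>
    simp only [List.foldl_cons]
    by_cases h : keys.contains kv.1 = true
    · rw [if_pos h, ← filter_insert_mem keys kv.1 kv.2 d h, ih]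
    · rw [if_neg h,
        insert_filter_not_mem keys kv.1 kv.2 d (Bool.eq_false_iff.mpr h), ih]

-- appending in a loop is mapping
theorem foldl_append_singleton_eq_map (g : List (String × Int) → List (String × Int))
    (l : List (List (String × Int))) (acc : List (List (String × Int))) :
    l.foldl (fun r c => r ++ [g c]) acc = acc ++ l.map g := by
  induction l generalizing acc with
  | nil => simp
  | cons c l ih => simp [ih]

-- ===== VERDICT (by name: the statement is the Claim_ definition above) =====
theorem filter_out_keys_spec : Claim_equal_filter_out_keys := by
  intro data keys _
  unfold Spec_filter_out_keys filter_out_keys filter_out_keys_alt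
  rw [foldl_append_singleton_eq_map]
  simp only [List.nil_append]
  apply List.map_congr_left
  intro column _
  have hpop : (fun (copy : PySem.Dict String Int) (key : String) =>
      match copy.pop? key with
      | some (_, d) => d
      | none => copy) = (fun d k => d.erase k) := by
    funext d k
    exact pop_step_eq_erase d k
  rw [hpop, foldl_erase_eq_filter]
  have : PySem.Dict.empty
      = PySem.Dict.mk ((PySem.Dict.empty : PySem.Dict String Int).items.filter
          (fun kv => !keys.contains kv.1)) := rfl
  rw [this, foldl_insert_filter]
  rfl
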